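-- pv_equiv track=rewrite | github.com/Danyocheck/Algorithms | yandex_contest/final_contest/A.py | find_cx
-- ===== SOURCE A (Python) =====
-- def find_cx(x):
--     idx_a, idx_b = 1, 1
--     val_a, val_b = 1, 1
--
--     for _ in range(x):
--         if val_a < val_b:
--             yield val_a
--             idx_a += 1
--             val_a = idx_a ** 2
--         else:
--             yield val_b
--             idx_b += 1
--             val_b = idx_b ** 3
-- ===== SOURCE B (Python) =====
-- def find_cx(x):
--     # Build the first x squares and first x cubes, sort the combined list,
--     # and yield its first x elements (a generator, like A).
--     for v in sorted([i * i for i in range(1, x + 1)]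
--                     + [i ** 3 for i in range(1, x + 1)])[:x]:
--         yield v
-- ===== Notes on version B (the rewrite author's own statement) =====
-- stated objective: simpler
-- what changed: Replaces the stateful two-pointer merge loop with generating x squares and x cubes, sorting the combined list once and yielding its first x elements.
import Mathlib
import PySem

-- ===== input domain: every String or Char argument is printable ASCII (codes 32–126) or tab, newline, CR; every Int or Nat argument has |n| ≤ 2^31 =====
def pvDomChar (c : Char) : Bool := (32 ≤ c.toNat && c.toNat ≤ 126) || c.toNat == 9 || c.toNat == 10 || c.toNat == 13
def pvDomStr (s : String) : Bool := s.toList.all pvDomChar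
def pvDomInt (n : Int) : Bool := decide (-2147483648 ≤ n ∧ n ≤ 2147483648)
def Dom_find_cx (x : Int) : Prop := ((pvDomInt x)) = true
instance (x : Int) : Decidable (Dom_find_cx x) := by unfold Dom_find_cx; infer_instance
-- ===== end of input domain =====

-- B replaces A's stateful two-pointer merge loop by building x squares and x cubes,
-- sorting the combined list once and taking its first x elements (objective: simpler).
-- Both Pythons are generators; equivalence is about the yielded sequence as a list.

-- ===== PORT A =====
-- the for-loop of A: n iterations remaining, state (idx_a, idx_b, val_a, val_b)
def findLoopA : Nat → Int → Int → Int → Int → List Int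
  | 0, _, _, _, _ => []
  | n + 1, ia, ib, va, vb =>
    if va < vb then va :: findLoopA n (ia + 1) ib ((ia + 1) ^ 2) vb
    else vb :: findLoopA n ia (ib + 1) va ((ib + 1) ^ 3)

def find_cx (x : Int) : List Int := findLoopA x.toNat 1 1 1 1

-- ===== PORT B =====
def find_cx_alt (x : Int) : List Int :=
  (PySem.List.sorted
      (((PySem.List.pyRange 1 (x + 1) 1).map (fun i => i * i)) ++
       ((PySem.List.pyRange 1 (x + 1) 1).map (fun i => i ^ 3)))
      (fun v => v) false).take x.toNat

-- ===== PRECONDITION & SPEC =====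
def Spec_find_cx (x : Int) (out : List Int) : Prop := out = find_cx_alt x
instance (x : Int) (out : List Int) : Decidable (Spec_find_cx x out) := by unfold Spec_find_cx; infer_instance

-- ===== CLAIM (what is proved, stated in full; the proofs are below) =====
def Claim_equal_find_cx : Prop := ∀ (x : Int), Dom_find_cx x → Spec_find_cx x (find_cx x)

-- ===== LEMMAS AND PROOFS =====

-- the next n squares starting at index a, and the next n cubes starting at index b
def sqL (n : Nat) (a : Int) : List Int := (List.range n).map (fun (k : Nat) => (a + (k : Int)) ^ 2)
def cuL (n : Nat) (b : Int) : List Int := (List.range n).map (fun (k : Nat) => (b + (k : Int)) ^ 3)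

-- a plain two-way merge (ties go to the right list, like A's else-branch)
def merge2 : List Int → List Int → List Int
  | [], bs => bs
  | as, [] => as
  | a :: as, b :: bs => if a < b then a :: merge2 as (b :: bs) else b :: merge2 (a :: as) bs
termination_by as bs => as.length + bs.length

-- a counted merge: exactly n output elements, assuming both inputs are long enough
def mergeN : Nat → List Int → List Int → List Int
  | 0, _, _ => []
  | _ + 1, [], _ => []
  | _ + 1, _, [] => []
  | n + 1, a :: as, b :: bs =>
    if a < b then a :: mergeN n as (b :: bs) else b :: mergeN n (a :: as) bs

theorem sqL_cons (n : Nat) (a : Int) : sqL (n + 1) a = a ^ 2 :: sqL n (a + 1) := by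
  rw [sqL, List.range_succ_eq_map, List.map_cons, List.map_map, sqL]
  congr 1
  · push_cast; ring
  · apply List.map_congr_left; intro k _; simp only [Function.comp]; push_cast; ring

theorem cuL_cons (n : Nat) (b : Int) : cuL (n + 1) b = b ^ 3 :: cuL n (b + 1) := by
  rw [cuL, List.range_succ_eq_map, List.map_cons, List.map_map, cuL]
  congr 1
  · push_cast; ring
  · apply List.map_congr_left; intro k _; simp only [Function.comp]; push_cast; ring

theorem sqL_snoc (n : Nat) (a : Int) : sqL (n + 1) a = sqL n a ++ [(a + n) ^ 2] := by
  simp [sqL, List.range_succ]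

theorem cuL_snoc (n : Nat) (b : Int) : cuL (n + 1) b = cuL n b ++ [(b + n) ^ 3] := by
  simp [cuL, List.range_succ]

theorem length_sqL (n : Nat) (a : Int) : (sqL n a).length = n := by simp [sqL]
theorem length_cuL (n : Nat) (b : Int) : (cuL n b).length = n := by simp [cuL]

theorem mergeN_append_right : ∀ (n : Nat) (as bs ex : List Int), n ≤ bs.length →
    mergeN n as (bs ++ ex) = mergeN n as bs := by
  intro n
  induction n with
  | zero => intro as bs ex _; simp [mergeN]
  | succ n ih =>
    intro as bs ex h
    match bs with
    | [] => simp at h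
    | b :: bs' =>
      match as with
      | [] => simp [mergeN]
      | a :: as' =>
        simp only [List.cons_append, mergeN]
        split
        · rw [show b :: (bs' ++ ex) = (b :: bs') ++ ex from rfl, ih]
          simpa using Nat.le_of_succ_le_succ (Nat.le_succ_of_le (by simpa using h))
        · rw [ih]
          exact Nat.le_of_succ_le_succ (by simpa using h)

theorem mergeN_append_left : ∀ (n : Nat) (as ex bs : List Int), n ≤ as.length →
    mergeN n (as ++ ex) bs = mergeN n as bs := by
  intro n
  induction n with
  | zero => intro as ex bs _; simp [mergeN]
  | succ n ih =>
    intro as ex bs h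
    match as with
    | [] => simp at h
    | a :: as' =>
      match bs with
      | [] => simp [mergeN]
      | b :: bs' =>
        simp only [List.cons_append, mergeN]
        split
        · rw [ih]
          exact Nat.le_of_succ_le_succ (by simpa using h)
        · rw [show a :: (as' ++ ex) = (a :: as') ++ ex from rfl, ih]
          simpa using Nat.le_of_succ_le_succ (Nat.le_succ_of_le (by simpa using h))

-- A's loop computes the counted merge of the upcoming squares and cubes
theorem findLoopA_eq_mergeN : ∀ (n : Nat) (ia ib : Int),
    findLoopA n ia ib (ia ^ 2) (ib ^ 3) = mergeN n (sqL n ia) (cuL n ib) := by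
  intro n
  induction n with
  | zero => intro ia ib; rfl
  | succ n ih =>
    intro ia ib
    rw [sqL_cons, cuL_cons, findLoopA, mergeN]
    split
    · rw [ih ( ia + 1) ib]
      congr 1
      have h : cuL (n + 1) ib = cuL n ib ++ [(ib + n) ^ 3] := cuL_snoc n ib
      rw [← cuL_cons, h, mergeN_append_right n _ _ _ (by rw [length_cuL])]
    · rw [ih ia (ib + 1)]
      congr 1
      have h : sqL (n + 1) ia = sqL n ia ++ [(ia + n) ^ 2] := sqL_snoc n ia
      rw [← sqL_cons, h, mergeN_append_left n _ _ _ (by rw [length_sqL])]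

theorem mergeN_eq_take_merge2 : ∀ (n : Nat) (as bs : List Int),
    n ≤ as.length → n ≤ bs.length → mergeN n as bs = (merge2 as bs).take n := by
  intro n
  induction n with
  | zero => intro as bs _ _; simp [mergeN]
  | succ n ih =>
    intro as bs ha hb
    match as, bs with
    | [], _ => simp at ha
    | _ :: _, [] => simp at hb
    | a :: as', b :: bs' =>
      rw [mergeN, merge2]
      split
      · rw [List.take_succ_cons, ih as' (b :: bs') (by simpa using ha)
          (Nat.le_of_succ_le (by simpa using hb))]
      · rw [List.take_succ_cons, ih (a :: as') bs'
          (Nat.le_of_succ_le (by simpa using ha)) (by simpa using hb)]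

theorem merge2_perm : ∀ (as bs : List Int), (merge2 as bs).Perm (as ++ bs) := by
  intro as bs
  induction as, bs using merge2.induct with
  | case1 bs => simp [merge2]
  | case2 as => cases as <;> simp [merge2]
  | case3 a as b bs h ih =>
    rw [merge2, if_pos h]
    exact (ih.cons a)
  | case4 a as b bs h ih =>
    rw [merge2, if_neg h]
    exact (ih.cons b).trans (List.perm_middle (a := b) (l₁ := a :: as) (l₂ := bs)).symm

theorem mem_merge2 {x : Int} {as bs : List Int} (h : x ∈ merge2 as bs) : x ∈ as ++ bs :=
  (merge2_perm as bs).mem_iff.mp h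

theorem merge2_pairwise : ∀ (as bs : List Int), as.Pairwise (· ≤ ·) → bs.Pairwise (· ≤ ·) →
    (merge2 as bs).Pairwise (· ≤ ·) := by
  intro as bs
  induction as, bs using merge2.induct with
  | case1 bs => intro _ hb; simpa [merge2] using hb
  | case2 as => intro ha _; cases as <;> simp_all [merge2]
  | case3 a as b bs h ih =>
    intro ha hb
    rw [merge2, if_pos h]
    rw [List.pairwise_cons] at ha ⊢
    refine ⟨fun y hy => ?_, ih ha.2 hb⟩
    rcases (List.mem_append.mp (mem_merge2 hy)) with h1 | h1
    · exact ha.1 y h1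
    · rcases List.mem_cons.mp h1 with rfl | h2
      · exact le_of_lt h
      · exact le_trans (le_of_lt h) ((List.pairwise_cons.mp hb).1 y h2)
  | case4 a as b bs h ih =>
    intro ha hb
    rw [merge2, if_neg h]
    rw [List.pairwise_cons] at hb ⊢
    refine ⟨fun y hy => ?_, ih ha hb.2⟩
    have hba : b ≤ a := le_of_not_gt h
    rcases (List.mem_append.mp (mem_merge2 hy)) with h1 | h1
    · rcases List.mem_cons.mp h1 with rfl | h2
      · exact hba
      · exact le_trans hba ((List.pairwise_cons.mp ha).1 y h2)
    · exact hb.1 y h1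

theorem pairwise_sqL (n : Nat) : (sqL n 1).Pairwise (· ≤ ·) := by
  unfold sqL
  rw [List.pairwise_map]
  refine List.pairwise_lt_range.imp ?_
  intro k l hkl
  have h2 : (k : Int) ≤ l := by exact_mod_cast hkl.le
  nlinarith [Int.natCast_nonneg k, Int.natCast_nonneg l, sq_nonneg ((k : Int) + l), sq_nonneg ((k : Int) - l)]

theorem pairwise_cuL (n : Nat) : (cuL n 1).Pairwise (· ≤ ·) := by
  unfold cuL
  rw [List.pairwise_map]
  refine List.pairwise_lt_range.imp ?_
  intro k l hkl
  have h2 : (k : Int) ≤ l := by exact_mod_cast hkl.le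
  nlinarith [Int.natCast_nonneg k, Int.natCast_nonneg l, sq_nonneg ((k : Int) + l), sq_nonneg ((k : Int) - l)]

-- the merge of two weakly increasing lists IS Python's sorted of their concatenation
theorem merge2_eq_sorted (as bs : List Int) (ha : as.Pairwise (· ≤ ·))
    (hb : bs.Pairwise (· ≤ ·)) :
    PySem.List.sorted (as ++ bs) (fun v => v) false = merge2 as bs :=
  PySem.List.sorted_id_eq_of_perm_of_pairwise _ _ (merge2_perm as bs) (merge2_pairwise as bs ha hb)

theorem pyRange_sq (x : Int) :
    (PySem.List.pyRange 1 (x + 1) 1).map (fun i => i * i) = sqL x.toNat 1 := by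
  rw [PySem.List.pyRange_one, List.map_map, sqL]
  have : (x + 1 - 1).toNat = x.toNat := by omega
  rw [this]
  apply List.map_congr_left; intro k _
  simp only [Function.comp]; ring

theorem pyRange_cu (x : Int) :
    (PySem.List.pyRange 1 (x + 1) 1).map (fun i => i ^ 3) = cuL x.toNat 1 := by
  rw [PySem.List.pyRange_one, List.map_map, cuL]
  have : (x + 1 - 1).toNat = x.toNat := by omega
  rw [this]
  apply List.map_congr_left; intro k _
  simp only [Function.comp]

-- ===== VERDICT (by name: the statement is the Claim_ definition above) =====
theorem find_cx_spec : Claim_equal_find_cx := by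
  intro x _
  unfold Spec_find_cx find_cx find_cx_alt
  rw [pyRange_sq, pyRange_cu,
    merge2_eq_sorted _ _ (pairwise_sqL x.toNat) (pairwise_cuL x.toNat),
    ← mergeN_eq_take_merge2 x.toNat _ _ (by rw [length_sqL]) (by rw [length_cuL])]
  have h1 : (1 : Int) = 1 ^ 2 := by norm_num
  have h2 : (1 : Int) = 1 ^ 3 := by norm_num
  rw [show findLoopA x.toNat 1 1 1 1 = findLoopA x.toNat 1 1 (1 ^ 2) (1 ^ 3) by norm_num]
  exact findLoopA_eq_mergeN x.toNat 1 1
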